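-- pv_equiv track=rewrite | github.com/MolCrafts/molmcp | packages/molmcp-lammps/src/molmcp_lammps/_dev/lammps_slugs.py | diff_against_existing
-- ===== SOURCE A (Python) =====
-- def diff_against_existing(
--     existing: dict[tuple[str, str], str],
--     new: dict[tuple[str, str], str],
-- ) -> tuple[
--     list[tuple[tuple[str, str], str]],
--     list[tuple[tuple[str, str], str, str]],
--     list[tuple[tuple[str, str], str]],
-- ]:
--     """Compute (added, changed, removed) for two slug maps."""
--     added = [
--         (key, new[key]) for key in sorted(set(new) - set(existing))
--     ]
--     removed = [
--         (key, existing[key]) for key in sorted(set(existing) - set(new))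
--     ]
--     changed = [
--         (key, existing[key], new[key])
--         for key in sorted(set(existing) & set(new))
--         if existing[key] != new[key]
--     ]
--     return added, changed, removed
-- ===== SOURCE B (Python) =====
-- def diff_against_existing(
--     existing: dict[tuple[str, str], str],
--     new: dict[tuple[str, str], str],
-- ) -> tuple[
--     list[tuple[tuple[str, str], str]],
--     list[tuple[tuple[str, str], str, str]],
--     list[tuple[tuple[str, str], str]],
-- ]:
--     """Compute (added, changed, removed) for two slug maps in one sorted pass."""
--     added, changed, removed = [], [], []
--     for key in sorted(set(existing) | set(new)):
--         if key not in existing: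
--             added.append((key, new[key]))
--         elif key not in new:
--             removed.append((key, existing[key]))
--         elif existing[key] != new[key]:
--             changed.append((key, existing[key], new[key]))
--     return added, changed, removed
-- ===== Notes on version B (the rewrite author's own statement) =====
-- stated objective: alternative
-- what changed: Replaces A's three separate set-difference/intersection comprehensions (each with its own sort) by a single sorted pass over the union of the key sets that dispatches every key into added/removed/changed with one if/elif chain.
import Mathlib
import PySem

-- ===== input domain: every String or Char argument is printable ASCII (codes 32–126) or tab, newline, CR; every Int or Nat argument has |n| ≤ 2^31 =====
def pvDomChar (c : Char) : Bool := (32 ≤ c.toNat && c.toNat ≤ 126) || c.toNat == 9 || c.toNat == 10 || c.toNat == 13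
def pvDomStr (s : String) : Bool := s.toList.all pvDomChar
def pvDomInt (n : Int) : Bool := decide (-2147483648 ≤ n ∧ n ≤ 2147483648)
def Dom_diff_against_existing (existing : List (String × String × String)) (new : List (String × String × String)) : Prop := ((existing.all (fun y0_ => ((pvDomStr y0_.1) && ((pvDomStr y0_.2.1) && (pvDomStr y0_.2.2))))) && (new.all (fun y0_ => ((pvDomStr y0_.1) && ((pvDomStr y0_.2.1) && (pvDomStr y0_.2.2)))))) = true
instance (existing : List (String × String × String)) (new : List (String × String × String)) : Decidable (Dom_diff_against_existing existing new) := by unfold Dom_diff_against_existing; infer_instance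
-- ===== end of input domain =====

-- B replaces A's three sorted set-difference/intersection passes by one pass over the sorted union
-- of the key sets with an if/elif chain (objective: alternative decomposition, same cost).

-- ===== PORT A =====
-- shared marshalling: the dict[tuple[str,str], str] argument, given as a triple list, as a PySem.Dict
def pvToDict (xs : List (String × String × String)) : PySem.Dict (String × String) String :=
  PySem.Dict.ofList (xs.map (fun t => ((t.1, t.2.1), t.2.2)))

-- literal port of A; 'new[key]' / 'existing[key]' are ported as getD with an unused default:
-- every key looked up is drawn from that dict's own key set, so the default is never used (no KeyError).
def diff_against_existing (existing : List (String × String × String)) (new : List (String × String × String)) : (List ((String × String) × String)) × (List ((String × String) × String × String)) × (List ((String × String) × String)) :=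
  let dE := pvToDict existing
  let dN := pvToDict new
  let added := (PySem.List.sorted2 (PySem.Set.diff (PySem.Set.ofList dN.keys) (PySem.Set.ofList dE.keys)) Prod.fst Prod.snd).map (fun k => (k, dN.getD k ""))
  let removed := (PySem.List.sorted2 (PySem.Set.diff (PySem.Set.ofList dE.keys) (PySem.Set.ofList dN.keys)) Prod.fst Prod.snd).map (fun k => (k, dE.getD k ""))
  let changed := ((PySem.List.sorted2 (PySem.Set.inter (PySem.Set.ofList dE.keys) (PySem.Set.ofList dN.keys)) Prod.fst Prod.snd).filter (fun k => dE.getD k "" != dN.getD k "")).map (fun k => (k, (dE.getD k "", dN.getD k "")))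
  (added, changed, removed)

-- ===== PORT B =====
-- literal port of Source B: one fold over sorted(set(existing) | set(new)) dispatching each key
def diff_against_existing_alt (existing : List (String × String × String)) (new : List (String × String × String)) : (List ((String × String) × String)) × (List ((String × String) × String × String)) × (List ((String × String) × String)) :=
  let dE := pvToDict existing
  let dN := pvToDict new
  let allKeys := PySem.List.sorted2 (PySem.Set.union (PySem.Set.ofList dE.keys) (PySem.Set.ofList dN.keys)) Prod.fst Prod.snd
  allKeys.foldl (fun acc k =>
    if !dE.contains k then (acc.1 ++ [(k, dN.getD k "")], acc.2.1, acc.2.2)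
    else if !dN.contains k then (acc.1, acc.2.1, acc.2.2 ++ [(k, dE.getD k "")])
    else if dE.getD k "" != dN.getD k "" then (acc.1, acc.2.1 ++ [(k, (dE.getD k "", dN.getD k ""))], acc.2.2)
    else acc) ([], [], [])

-- ===== PRECONDITION & SPEC =====
def Spec_diff_against_existing (existing : List (String × String × String)) (new : List (String × String × String)) (out : (List ((String × String) × String)) × (List ((String × String) × String × String)) × (List ((String × String) × String))) : Prop := out = diff_against_existing_alt existing new
instance (existing : List (String × String × String)) (new : List (String × String × String)) (out : (List ((String × String) × String)) × (List ((String × String) × String × String)) × (List ((String × String) × String))) : Decidable (Spec_diff_against_existing existing new out) := by unfold Spec_diff_against_existing; infer_instance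

-- ===== CLAIM (what is proved, stated in full; the proofs are below) =====
def Claim_equal_diff_against_existing : Prop := ∀ (existing : List (String × String × String)) (new : List (String × String × String)), Dom_diff_against_existing existing new → Spec_diff_against_existing existing new (diff_against_existing existing new)

-- ===== LEMMAS AND PROOFS =====

-- Python's tuple order on (str, str) keys, as a Prop and as the Bool test sorted2 uses
def pvLexLt (a b : String × String) : Prop := a.1 < b.1 ∨ (a.1 = b.1 ∧ a.2 < b.2)

def pvLtb (a b : String × String) : Bool :=
  decide (a.1 < b.1) || (!decide (b.1 < a.1) && decide (a.2 < b.2))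

theorem pvLtb_iff (a b : String × String) : pvLtb a b = true ↔ pvLexLt a b := by
  simp only [pvLtb, pvLexLt, Bool.or_eq_true, Bool.and_eq_true, Bool.not_eq_true',
    decide_eq_true_iff, decide_eq_false_iff_not]
  constructor
  · rintro (h | ⟨h1, h2⟩)
    · exact Or.inl h
    · rcases lt_trichotomy a.1 b.1 with h | h | h
      · exact Or.inl h
      · exact Or.inr ⟨h, h2⟩
      · exact absurd h h1
  · rintro (h | ⟨h1, h2⟩)
    · exact Or.inl h
    · exact Or.inr ⟨by rw [h1]; exact lt_irrefl _, h2⟩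

theorem pvLexLt_trans {a b c : String × String} (h1 : pvLexLt a b) (h2 : pvLexLt b c) : pvLexLt a c := by
  rcases h1 with h1 | ⟨e1, l1⟩ <;> rcases h2 with h2 | ⟨e2, l2⟩
  · exact Or.inl (lt_trans h1 h2)
  · exact Or.inl (e2 ▸ h1)
  · exact Or.inl (e1 ▸ h2)
  · exact Or.inr ⟨e1.trans e2, lt_trans l1 l2⟩

theorem pvLexLt_asymm {a b : String × String} (h : pvLexLt a b) : ¬ pvLexLt b a := by
  intro h'
  rcases h with h | ⟨e, l⟩ <;> rcases h' with h' | ⟨e', l'⟩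
  · exact lt_asymm h h'
  · exact absurd h (e' ▸ lt_irrefl _)
  · exact absurd h' (e ▸ lt_irrefl _)
  · exact lt_asymm l l'

theorem pvLexLt_total {a b : String × String} (hne : a ≠ b) (h : ¬ pvLexLt a b) : pvLexLt b a := by
  rcases lt_trichotomy a.1 b.1 with h1 | h1 | h1
  · exact absurd (Or.inl h1) h
  · rcases lt_trichotomy a.2 b.2 with h2 | h2 | h2
    · exact absurd (Or.inr ⟨h1, h2⟩) h
    · exact absurd (Prod.ext h1 h2) hne
    · exact Or.inr ⟨h1.symm, h2⟩
  · exact Or.inl h1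

theorem pairwise_insertBy {x : String × String} {ys : List (String × String)}
    (hx : x ∉ ys) (h : ys.Pairwise pvLexLt) :
    (PySem.List.insertBy pvLtb x ys).Pairwise pvLexLt := by
  induction ys with
  | nil => simp [PySem.List.insertBy]
  | cons y ys ih =>
    simp only [PySem.List.insertBy]
    by_cases hb : pvLtb x y = true
    · rw [if_pos hb]
      have hxy : pvLexLt x y := (pvLtb_iff _ _).mp hb
      refine List.Pairwise.cons ?_ h
      intro z hz
      rcases hz with _ | hz
      · exact hxy
      · exact pvLexLt_trans hxy (List.rel_of_pairwise_cons h (by assumption))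
    · rw [if_neg hb]
      have hne : x ≠ y := fun e => hx (by rw [e]; exact List.mem_cons_self)
      have hyx : pvLexLt y x := pvLexLt_total hne (fun hl => hb ((pvLtb_iff _ _).mpr hl))
      refine List.Pairwise.cons ?_ (ih (fun hm => hx (List.mem_cons_of_mem _ hm)) h.of_cons)
      intro z hz
      rcases (PySem.List.mem_insertBy _ _ _ _).mp hz with rfl | hz
      · exact hyx
      · exact List.rel_of_pairwise_cons h hz

theorem foldl_insertBy_pairwise :
    ∀ (xs acc : List (String × String)), acc.Pairwise pvLexLt → (∀ a ∈ acc, a ∉ xs) → xs.Nodup →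
    (xs.foldl (fun acc x => PySem.List.insertBy pvLtb x acc) acc).Pairwise pvLexLt := by
  intro xs
  induction xs with
  | nil => intro acc h _ _; simpa using h
  | cons x xs ih =>
    intro acc hacc hdisj hnd
    simp only [List.foldl_cons]
    have hx : x ∉ acc := fun hm => hdisj x hm List.mem_cons_self
    refine ih _ (pairwise_insertBy hx hacc) ?_ (List.Nodup.of_cons hnd)
    intro a ha
    rcases (PySem.List.mem_insertBy _ _ _ _).mp ha with rfl | ha
    · exact (List.nodup_cons.mp hnd).1
    · exact fun hm => hdisj a ha (List.mem_cons_of_mem _ hm)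

theorem sorted2_eq_foldl (xs : List (String × String)) :
    PySem.List.sorted2 xs Prod.fst Prod.snd
      = xs.foldl (fun acc x => PySem.List.insertBy pvLtb x acc) [] := rfl

theorem sorted2_pairwise {xs : List (String × String)} (h : xs.Nodup) :
    (PySem.List.sorted2 xs Prod.fst Prod.snd).Pairwise pvLexLt := by
  rw [sorted2_eq_foldl]
  exact foldl_insertBy_pairwise xs [] List.Pairwise.nil (by simp) h

theorem mem_sorted2 {xs : List (String × String)} {a : String × String} :
    a ∈ PySem.List.sorted2 xs Prod.fst Prod.snd ↔ a ∈ xs :=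
  (PySem.List.sorted2_perm xs Prod.fst Prod.snd false).mem_iff

theorem nodup_sorted2 {xs : List (String × String)} (h : xs.Nodup) :
    (PySem.List.sorted2 xs Prod.fst Prod.snd).Nodup :=
  (PySem.List.sorted2_perm xs Prod.fst Prod.snd false).nodup_iff.mpr h

-- the heart: two filtered sorted key lists with the same members are equal
theorem sorted2_filter_eq (S T : List (String × String)) (p q : (String × String) → Bool)
    (hS : S.Nodup) (hT : T.Nodup)
    (hmem : ∀ a, (a ∈ S ∧ p a = true) ↔ (a ∈ T ∧ q a = true)) :
    (PySem.List.sorted2 S Prod.fst Prod.snd).filter p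
      = (PySem.List.sorted2 T Prod.fst Prod.snd).filter q := by
  refine List.Perm.eq_of_pairwise (le := pvLexLt) ?_ ((sorted2_pairwise hS).filter p)
    ((sorted2_pairwise hT).filter q) ?_
  · intro a b _ _ hab hba
    exact absurd hba (pvLexLt_asymm hab)
  · rw [List.perm_ext_iff_of_nodup ((nodup_sorted2 hS).filter p) ((nodup_sorted2 hT).filter q)]
    intro a
    simp only [List.mem_filter, mem_sorted2]
    exact hmem a

-- B's three-way dispatch fold, expressed as three filters
theorem foldl3 {α β γ δ : Type} (p1 p2 p3 : α → Bool) (f : α → β) (g : α → γ) (h : α → δ) :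
    ∀ (U : List α) (a : List β) (c : List γ) (r : List δ),
    U.foldl (fun acc k =>
        if p1 k then (acc.1 ++ [f k], acc.2.1, acc.2.2)
        else if p2 k then (acc.1, acc.2.1, acc.2.2 ++ [h k])
        else if p3 k then (acc.1, acc.2.1 ++ [g k], acc.2.2)
        else acc) (a, c, r)
      = (a ++ (U.filter p1).map f,
         c ++ (U.filter (fun k => !p1 k && (!p2 k && p3 k))).map g,
         r ++ (U.filter (fun k => !p1 k && p2 k)).map h) := by
  intro U
  induction U with
  | nil => intro a c r; simp
  | cons k U ih =>
    intro a c r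
    simp only [List.foldl_cons, List.filter_cons]
    by_cases h1 : p1 k = true
    · simp [h1, ih]
    · by_cases h2 : p2 k = true
      · simp [h1, h2, ih]
      · by_cases h3 : p3 k = true
        · simp [h1, h2, h3, ih]
        · simp [h1, h2, h3, ih]

theorem diff_eq_alt (existing new : List (String × String × String)) :
    diff_against_existing existing new = diff_against_existing_alt existing new := by
  simp only [diff_against_existing, diff_against_existing_alt]
  rw [foldl3]
  have hE := PySem.Set.nodup_ofList (α := String × String) (pvToDict existing).keys
  have hN := PySem.Set.nodup_ofList (α := String × String) (pvToDict new).keys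
  refine Prod.ext ?_ (Prod.ext ?_ ?_)
  · -- added
    simp only [List.nil_append]
    rw [← List.filter_true (PySem.List.sorted2 (PySem.Set.diff (PySem.Set.ofList (pvToDict new).keys) (PySem.Set.ofList (pvToDict existing).keys)) Prod.fst Prod.snd)]
    refine congrArg (List.map _) (sorted2_filter_eq _ _ _ _ (PySem.Set.nodup_diff _ _ hN) (PySem.Set.nodup_union _ _ hE) ?_)
    intro a
    simp only [and_true, PySem.Set.mem_diff, PySem.Set.mem_union, PySem.Set.mem_ofList,
      PySem.Dict.contains_eq_decide_mem_keys, Bool.not_eq_true', decide_eq_false_iff_not]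
    tauto
  · -- changed
    simp only [List.nil_append]
    refine congrArg (List.map _) (sorted2_filter_eq _ _ _ _ (PySem.Set.nodup_inter _ _ hE) (PySem.Set.nodup_union _ _ hE) ?_)
    intro a
    simp only [PySem.Set.mem_inter, PySem.Set.mem_union, PySem.Set.mem_ofList,
      PySem.Dict.contains_eq_decide_mem_keys, Bool.not_not,
      Bool.and_eq_true, decide_eq_true_eq]
    tauto
  · -- removed
    simp only [List.nil_append]
    rw [← List.filter_true (PySem.List.sorted2 (PySem.Set.diff (PySem.Set.ofList (pvToDict existing).keys) (PySem.Set.ofList (pvToDict new).keys)) Prod.fst Prod.snd)]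
    refine congrArg (List.map _) (sorted2_filter_eq _ _ _ _ (PySem.Set.nodup_diff _ _ hE) (PySem.Set.nodup_union _ _ hE) ?_)
    intro a
    simp only [and_true, PySem.Set.mem_diff, PySem.Set.mem_union, PySem.Set.mem_ofList,
      PySem.Dict.contains_eq_decide_mem_keys, Bool.not_eq_true', Bool.not_not,
      Bool.and_eq_true, decide_eq_false_iff_not, decide_eq_true_eq]
    tauto

-- ===== VERDICT (by name: the statement is the Claim_ definition above) =====
theorem diff_against_existing_spec : Claim_equal_diff_against_existing := by
  intro existing new _
  unfold Spec_diff_against_existing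
  exact diff_eq_alt existing new
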